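-- pv_equiv track=rewrite | github.com/xinyuren-bio/LNB-MDT | preparation/ndx_generator.py | _format_group
-- ===== SOURCE A (Python) =====
-- from typing import Iterable, List, Dict, Set
--
-- def _format_group(indices: Iterable[int]) -> List[str]:
--     """Format atom indices into Gromacs .ndx style lines (15 integers per line)."""
--     buffer: List[str] = []
--     lines: List[str] = []
--     for idx in indices:
--         buffer.append(str(idx))
--         if len(buffer) == 15:
--             lines.append(" ".join(buffer))
--             buffer = []
--     if buffer:
--         lines.append(" ".join(buffer))
--     return lines
-- ===== SOURCE B (Python) =====
-- from typing import Iterable, List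
--
-- def _format_group(indices: Iterable[int]) -> List[str]:
--     """Format atom indices into Gromacs .ndx style lines (15 integers per line)."""
--     strs = [str(idx) for idx in indices]
--     lines: List[str] = []
--     for i in range(0, len(strs), 15):
--         lines.append(" ".join(strs[i:i + 15]))
--     return lines
-- ===== Notes on version B (the rewrite author's own statement) =====
-- stated objective: alternative
-- what changed: Replaces the streaming buffer-with-flush accumulator by a two-pass scheme: first map all indices to strings, then emit lines by slicing that list in windows of 15 via a stepped range, so no final-flush special case exists.
import Mathlib
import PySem

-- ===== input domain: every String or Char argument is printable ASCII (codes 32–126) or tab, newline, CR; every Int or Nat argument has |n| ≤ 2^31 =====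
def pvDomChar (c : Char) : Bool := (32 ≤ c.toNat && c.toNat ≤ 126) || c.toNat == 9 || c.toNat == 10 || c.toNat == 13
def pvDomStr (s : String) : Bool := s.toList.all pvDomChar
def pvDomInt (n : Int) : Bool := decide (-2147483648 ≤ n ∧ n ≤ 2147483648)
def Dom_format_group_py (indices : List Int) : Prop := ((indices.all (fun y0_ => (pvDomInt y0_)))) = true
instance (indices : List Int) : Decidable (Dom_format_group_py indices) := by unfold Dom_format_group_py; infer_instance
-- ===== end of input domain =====

-- B replaces A's streaming buffer-with-flush accumulator by a two-pass scheme: map all indices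
-- to strings, then slice that list in windows of 15 via a stepped range (alternative decomposition).


-- ===== PORT A =====
def format_group_py (indices : List Int) : List String :=
  let st := indices.foldl
    (fun (st : List String × List String) idx =>
      let buffer := st.1 ++ [PySem.Int.toStr idx]
      if buffer.length = 15 then (([] : List String), st.2 ++ [PySem.Str.join " " buffer])
      else (buffer, st.2))
    ([], [])
  if st.1 ≠ [] then st.2 ++ [PySem.Str.join " " st.1] else st.2

-- ===== PORT B =====
def format_group_py_alt (indices : List Int) : List String :=
  let strs := indices.map PySem.Int.toStr
  (PySem.List.pyRange 0 (strs.length : Int) 15).foldl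
    (fun lines i => lines ++ [PySem.Str.join " " (PySem.List.slice strs (some i) (some (i + 15)))])
    []

-- ===== PRECONDITION & SPEC =====
def Spec_format_group_py (indices : List Int) (out : List String) : Prop := out = format_group_py_alt indices
instance (indices : List Int) (out : List String) : Decidable (Spec_format_group_py indices out) := by unfold Spec_format_group_py; infer_instance

-- ===== CLAIM (what is proved, stated in full; the proofs are below) =====
def Claim_equal_format_group_py : Prop := ∀ (indices : List Int), Dom_format_group_py indices → Spec_format_group_py indices (format_group_py indices)

-- ===== LEMMAS AND PROOFS =====

/-- Common form both ports reduce to: join successive windows of 15. -/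
def chunks (l : List String) : List String :=
  if h : l = [] then [] else PySem.Str.join " " (l.take 15) :: chunks (l.drop 15)
termination_by l.length
decreasing_by cases l with | nil => exact absurd rfl h | cons s r => simp

theorem chunks_nil : chunks [] = [] := by unfold chunks; simp

theorem chunks_ne_nil (l : List String) (h : l ≠ []) :
    chunks l = PySem.Str.join " " (l.take 15) :: chunks (l.drop 15) := by
  rw [chunks]; simp [h]

theorem chunks_append15 (buf l : List String) (h : buf.length = 15) :
    chunks (buf ++ l) = PySem.Str.join " " buf :: chunks l := by
  rw [chunks_ne_nil (buf ++ l) (by cases buf <;> simp_all)]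
  rw [List.take_left' h, List.drop_left' h]

theorem aLoop (xs : List Int) (buf lines : List String) (hb : buf.length < 15) :
    (let st := xs.foldl
      (fun (st : List String × List String) idx =>
        let buffer := st.1 ++ [PySem.Int.toStr idx]
        if buffer.length = 15 then (([] : List String), st.2 ++ [PySem.Str.join " " buffer])
        else (buffer, st.2))
      (buf, lines);
     if st.1 ≠ [] then st.2 ++ [PySem.Str.join " " st.1] else st.2)
    = lines ++ chunks (buf ++ xs.map PySem.Int.toStr) := by
  induction xs generalizing buf lines with
  | nil =>
    simp only [List.foldl_nil, List.map_nil, List.append_nil]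
    cases buf with
    | nil => simp [chunks_nil]
    | cons s rest =>
      rw [chunks_ne_nil _ (by simp)]
      rw [show List.take 15 (s :: rest) = s :: rest from List.take_of_length_le (by simp at hb ⊢; omega),
          show List.drop 15 (s :: rest) = [] from List.drop_eq_nil_of_le (by simp at hb ⊢; omega)]
      simp [chunks_nil]
  | cons x xs ih =>
    simp only [List.foldl_cons, List.map_cons]
    by_cases h15 : (buf ++ [PySem.Int.toStr x]).length = 15
    · rw [if_pos h15]
      rw [ih [] (lines ++ [PySem.Str.join " " (buf ++ [PySem.Int.toStr x])]) (by simp)]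
      rw [show buf ++ PySem.Int.toStr x :: xs.map PySem.Int.toStr
            = (buf ++ [PySem.Int.toStr x]) ++ xs.map PySem.Int.toStr by simp]
      rw [chunks_append15 _ _ h15]
      simp
    · rw [if_neg h15]
      rw [ih (buf ++ [PySem.Int.toStr x]) lines (by simp at h15 ⊢; omega)]
      simp

theorem format_group_py_eq_chunks (indices : List Int) :
    format_group_py indices = chunks (indices.map PySem.Int.toStr) := by
  have := aLoop indices [] [] (by simp)
  simpa [format_group_py] using this

theorem pyRange15_nil (a b : Int) (h : b ≤ a) : PySem.List.pyRange a b 15 = [] := by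
  simp only [PySem.List.pyRange]
  norm_num
  intro h2
  omega

theorem pyRange15_cons (a b : Int) (h : a < b) :
    PySem.List.pyRange a b 15 = a :: PySem.List.pyRange (a + 15) b 15 := by
  simp only [PySem.List.pyRange]
  norm_num
  rw [if_pos h]
  by_cases h2 : a + 15 < b
  · rw [if_pos h2]
    have hc : ((b - a + 15 - 1) / 15).toNat = ((b - (a + 15) + 15 - 1) / 15).toNat + 1 := by omega
    rw [hc, List.range_succ_eq_map, List.map_cons, List.map_map]
    congr 1
    · norm_num
    · apply List.map_congr_left
      intro k _
      simp only [Function.comp]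
      push_cast
      ring
  · rw [if_neg h2]
    have hc : ((b - a + 15 - 1) / 15).toNat = 1 := by omega
    rw [hc]
    simp

theorem bLoop (full : List String) (a : Nat) (acc : List String) :
    (PySem.List.pyRange (a : Int) (full.length : Int) 15).foldl
      (fun lines i => lines ++ [PySem.Str.join " " (PySem.List.slice full (some i) (some (i + 15)))])
      acc
    = acc ++ chunks (full.drop a) := by
  by_cases h : a < full.length
  · rw [pyRange15_cons _ _ (by exact_mod_cast h), List.foldl_cons]
    rw [PySem.List.slice_toNat full (by positivity) (by positivity)]
    rw [show ((a : Int) + 15) = ((a + 15 : Nat) : Int) by push_cast; ring]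
    simp only [Int.toNat_natCast]
    rw [bLoop full (a + 15) _]
    rw [chunks_ne_nil (full.drop a) (by simp; omega)]
    rw [show (a + 15) - a = 15 by omega, ← List.drop_drop, List.take_drop]
    simp [List.drop_drop]
  · rw [pyRange15_nil _ _ (by exact_mod_cast Nat.le_of_not_lt h)]
    rw [List.drop_eq_nil_of_le (by omega)]
    simp [chunks_nil]
termination_by full.length - a
decreasing_by omega

theorem format_group_py_alt_eq_chunks (indices : List Int) :
    format_group_py_alt indices = chunks (indices.map PySem.Int.toStr) := by
  have := bLoop (indices.map PySem.Int.toStr) 0 []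
  simpa [format_group_py_alt] using this

-- ===== VERDICT (by name: the statement is the Claim_ definition above) =====
theorem format_group_py_spec : Claim_equal_format_group_py := by
  intro indices _
  unfold Spec_format_group_py
  rw [format_group_py_eq_chunks, format_group_py_alt_eq_chunks]
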